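-- pv_equiv track=rewrite | github.com/pypi-data/pypi-mirror-84 | packages/libfunx/libfunx-0.9.2.tar.gz/libfunx-0.9.2/libfunx/__init__.py | no_html_tags
-- ===== SOURCE A (Python) =====
-- def no_html_tags(string):
--     "remove HTML tags '<...>' from string"
--     result = ""; tag = False
--     for char in string:
--         if char == "<":
--             tag = True
--         if not tag:
--             result += char
--         if char == ">":
--             tag = False
--     return result
-- ===== SOURCE B (Python) =====
-- def no_html_tags(string):
--     "remove HTML tags '<...>' from string"
--     lt = string.find("<")
--     if lt == -1:
--         return string
--     gt = string.find(">", lt + 1)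
--     if gt == -1:
--         return string[:lt]
--     return string[:lt] + no_html_tags(string[gt + 1:])
-- ===== Notes on version B (the rewrite author's own statement) =====
-- stated objective: faster
-- what changed: Replaces the per-character boolean state machine with quadratic string += by a recursive find/slice scan: find the next tag opener, emit the text before it, jump past its matching closer (or emit the prefix and stop if the tag is unterminated), and recurse on the remainder.
import Mathlib
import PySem

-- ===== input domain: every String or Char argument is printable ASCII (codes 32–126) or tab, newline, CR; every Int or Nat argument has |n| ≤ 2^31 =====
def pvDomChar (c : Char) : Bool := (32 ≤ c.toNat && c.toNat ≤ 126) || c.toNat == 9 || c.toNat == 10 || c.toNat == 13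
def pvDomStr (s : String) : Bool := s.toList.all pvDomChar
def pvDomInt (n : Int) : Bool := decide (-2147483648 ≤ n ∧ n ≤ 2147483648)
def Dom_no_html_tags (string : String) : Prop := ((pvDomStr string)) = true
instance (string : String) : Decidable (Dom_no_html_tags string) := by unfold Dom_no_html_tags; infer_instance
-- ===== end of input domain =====

-- B replaces A's per-character boolean state machine by a recursive find/slice scan
-- (emit text up to the next '<', jump past its matching '>', recurse); objective: alternative.

-- ===== PORT A =====
-- A's loop: result accumulator (as List Char) and the boolean `tag` flag, char by char.
def aLoop (l : List Char) (result : List Char) (tag : Bool) : List Char :=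
  match l with
  | [] => result
  | c :: cs =>
    let tag1 := if c = '<' then true else tag
    let result1 := if tag1 then result else result ++ [c]
    let tag2 := if c = '>' then false else tag1
    aLoop cs result1 tag2

def no_html_tags (string : String) : String :=
  String.mk (aLoop string.toList [] false)

-- ===== PORT B =====
-- port of str.find for a single character: index of the first occurrence (none = -1).
def pyFindCh (l : List Char) (c : Char) : Option Nat :=
  match l with
  | [] => none
  | x :: xs => if x = c then some 0 else (pyFindCh xs c).map (· + 1)

theorem pyFindCh_le {l : List Char} {c : Char} {i : Nat}
    (h : pyFindCh l c = some i) : i + 1 ≤ l.length := by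
  induction l generalizing i with
  | nil => simp [pyFindCh] at h
  | cons x xs ih =>
    simp only [pyFindCh] at h
    split at h
    · simp only [Option.some.injEq] at h
      simp only [List.length_cons]; omega
    · rcases Option.map_eq_some_iff.mp h with ⟨j, hj, rfl⟩
      have := ih hj
      simp only [List.length_cons]; omega

-- B: find the next '<'; if none, return the string; else find the matching '>' after it;
-- if none, return the prefix; else emit the prefix and recurse past the '>'.
def bCore (l : List Char) : List Char :=
  match hlt : pyFindCh l '<' with
  | none => l
  | some lt =>
    match hgt : pyFindCh (l.drop (lt + 1)) '>' with
    | none => l.take lt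
    | some gt => l.take lt ++ bCore ((l.drop (lt + 1)).drop (gt + 1))
termination_by l.length
decreasing_by
  have h1 := pyFindCh_le hlt
  have h2 := pyFindCh_le hgt
  simp [List.length_drop] at h2 ⊢
  omega

def no_html_tags_alt (string : String) : String :=
  String.mk (bCore string.toList)

-- ===== PRECONDITION & SPEC =====
def Spec_no_html_tags (string : String) (out : String) : Prop := out = no_html_tags_alt string
instance (string : String) (out : String) : Decidable (Spec_no_html_tags string out) := by unfold Spec_no_html_tags; infer_instance

-- ===== CLAIM (what is proved, stated in full; the proofs are below) =====
def Claim_equal_no_html_tags : Prop := ∀ (string : String), Dom_no_html_tags string → Spec_no_html_tags string (no_html_tags string)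

-- ===== LEMMAS AND PROOFS =====

-- pyFindCh characterisations
theorem pyFindCh_none {l : List Char} {c : Char} (h : pyFindCh l c = none) : c ∉ l := by
  induction l with
  | nil => simp
  | cons x xs ih =>
    simp only [pyFindCh] at h
    split at h
    · simp at h
    · rename_i hx
      simp only [Option.map_eq_none_iff] at h
      simp [ih h]; intro he; exact hx he.symm

theorem pyFindCh_some {l : List Char} {c : Char} {i : Nat} (h : pyFindCh l c = some i) :
    ∃ p r, l = p ++ c :: r ∧ c ∉ p ∧ p.length = i := by
  induction l generalizing i with
  | nil => simp [pyFindCh] at h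
  | cons x xs ih =>
    simp only [pyFindCh] at h
    split at h
    · rename_i hx
      simp at h
      exact ⟨[], xs, by simp [hx, h.symm]⟩
    · rename_i hx
      rcases Option.map_eq_some_iff.mp h with ⟨j, hj, rfl⟩
      rcases ih hj with ⟨p, r, rfl, hp, rfl⟩
      exact ⟨x :: p, r, rfl, by simp [hp]; intro he; exact hx he.symm, by simp⟩

-- A's loop over a '<'-free list with tag = false just copies the list.
theorem aLoop_noLt (l : List Char) (acc : List Char) (h : '<' ∉ l) :
    aLoop l acc false = acc ++ l := by
  induction l generalizing acc with
  | nil => simp [aLoop]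
  | cons c cs ih =>
    simp only [aLoop]
    have hc : ¬ c = '<' := by intro he; exact h (he ▸ List.mem_cons_self ..)
    have hcs : '<' ∉ cs := fun hm => h (List.mem_cons_of_mem _ hm)
    by_cases hg : c = '>' <;> simp [hc, hg, ih _ hcs]

-- A's loop passes a '<'-free prefix through unchanged (tag = false).
theorem aLoop_prefix (p l : List Char) (acc : List Char) (h : '<' ∉ p) :
    aLoop (p ++ l) acc false = aLoop l (acc ++ p) false := by
  induction p generalizing acc with
  | nil => simp
  | cons c cs ih =>
    have hc : ¬ c = '<' := by intro he; exact h (he ▸ List.mem_cons_self ..)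
    have hcs : '<' ∉ cs := fun hm => h (List.mem_cons_of_mem _ hm)
    by_cases hg : c = '>' <;> simp [aLoop, hc, hg, ih _ hcs]

-- In tag state, a '>'-free list is entirely skipped.
theorem aLoop_skip_all (l : List Char) (acc : List Char) (h : '>' ∉ l) :
    aLoop l acc true = acc := by
  induction l with
  | nil => rfl
  | cons c cs ih =>
    have hc : ¬ c = '>' := by intro he; exact h (he ▸ List.mem_cons_self ..)
    have hcs : '>' ∉ cs := fun hm => h (List.mem_cons_of_mem _ hm)
    by_cases hl : c = '<' <;> simp [aLoop, hc, hl, ih hcs]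

-- In tag state, everything up to and including the first '>' is skipped.
theorem aLoop_skip (m l : List Char) (acc : List Char) (h : '>' ∉ m) :
    aLoop (m ++ '>' :: l) acc true = aLoop l acc false := by
  induction m with
  | nil => simp [aLoop]
  | cons c cs ih =>
    have hc : ¬ c = '>' := by intro he; exact h (he ▸ List.mem_cons_self ..)
    have hcs : '>' ∉ cs := fun hm => h (List.mem_cons_of_mem _ hm)
    by_cases hl : c = '<' <;> simp [aLoop, hc, hl, ih hcs]

-- Equation lemmas for bCore's three arms.
theorem bCore_eq_none {l : List Char} (h : pyFindCh l '<' = none) : bCore l = l := by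
  rw [bCore.eq_def]; split <;> simp_all

theorem bCore_eq_take {l : List Char} {lt : Nat} (h1 : pyFindCh l '<' = some lt)
    (h2 : pyFindCh (l.drop (lt + 1)) '>' = none) : bCore l = l.take lt := by
  rw [bCore.eq_def]
  split
  · simp_all
  · rename_i lt' hlt'
    rw [h1] at hlt'; injection hlt' with e; subst e
    split <;> simp_all

theorem bCore_eq_app {l : List Char} {lt gt : Nat} (h1 : pyFindCh l '<' = some lt)
    (h2 : pyFindCh (l.drop (lt + 1)) '>' = some gt) :
    bCore l = l.take lt ++ bCore ((l.drop (lt + 1)).drop (gt + 1)) := by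
  rw [bCore.eq_def]
  split
  · simp_all
  · rename_i lt' hlt'
    rw [h1] at hlt'; injection hlt' with e; subst e
    split
    · simp_all
    · rename_i gt' hgt'
      rw [h2] at hgt'; injection hgt' with e; subst e
      rfl

-- A's loop accumulator can be pulled out front.
theorem aLoop_acc (t : List Char) (a : List Char) (b : Bool) :
    aLoop t a b = a ++ aLoop t [] b := by
  induction t generalizing a b with
  | nil => simp [aLoop]
  | cons c cs ihc =>
    simp only [aLoop]
    rw [ihc]
    conv_rhs => rw [ihc]
    by_cases h1 : (if c = '<' then true else b) = true <;>
      simp [h1, List.append_assoc]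

-- Main lemma: A's state machine equals B's find/slice recursion.
theorem aLoop_eq_bCore (l : List Char) : aLoop l [] false = bCore l := by
  induction l using bCore.induct with
  | case1 l hlt =>
    rw [bCore_eq_none hlt]
    exact aLoop_noLt l [] (pyFindCh_none hlt)
  | case2 l lt hlt hgt =>
    rw [bCore_eq_take hlt hgt]
    rcases pyFindCh_some hlt with ⟨p, r, rfl, hp, rfl⟩
    have hdrop : (p ++ '<' :: r).drop (p.length + 1) = r := by simp [List.drop_append]
    have htake : (p ++ '<' :: r).take p.length = p := by simp
    rw [hdrop] at hgt
    rw [htake, aLoop_prefix p _ [] hp]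
    simp only [List.nil_append]
    have h1 : aLoop ('<' :: r) p false = aLoop r p true := by simp [aLoop]
    rw [h1]
    exact aLoop_skip_all r p (pyFindCh_none hgt)
  | case3 l lt hlt g hgt ih =>
    rw [bCore_eq_app hlt hgt]
    rcases pyFindCh_some hlt with ⟨p, r, rfl, hp, rfl⟩
    have hdrop : (p ++ '<' :: r).drop (p.length + 1) = r := by simp [List.drop_append]
    have htake : (p ++ '<' :: r).take p.length = p := by simp
    rw [hdrop] at hgt ih ⊢
    rcases pyFindCh_some hgt with ⟨m, s, rfl, hm, rfl⟩
    have hdrop2 : (m ++ '>' :: s).drop (m.length + 1) = s := by simp [List.drop_append]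
    rw [hdrop2] at ih ⊢
    rw [htake, aLoop_prefix p _ [] hp]
    simp only [List.nil_append]
    have h1 : aLoop ('<' :: (m ++ '>' :: s)) p false = aLoop (m ++ '>' :: s) p true := by
      simp [aLoop]
    rw [h1, aLoop_skip m s p hm, aLoop_acc, ih]

-- ===== VERDICT (by name: the statement is the Claim_ definition above) =====
theorem no_html_tags_spec : Claim_equal_no_html_tags := by
  intro s _
  show no_html_tags s = no_html_tags_alt s
  unfold no_html_tags no_html_tags_alt
  rw [aLoop_eq_bCore]
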